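-- pv_equiv track=rewrite | github.com/aarnphm/EAGLE | eagle/train/eagle3/prepare_mixed_dataset.py | convert_ultrachat_to_standard_format
-- ===== SOURCE A (Python) =====
-- from typing import Dict, List, Any, Optional
--
-- def convert_ultrachat_to_standard_format(conversation: List[str]) -> List[Dict[str, str]]:
--     """Convert UltraChat format to standard conversation format."""
--     conversations = []
--     for i in range(0, len(conversation), 2):
--         if i < len(conversation):
--             conversations.append({
--                 "from": "human",
--                 "value": conversation[i]
--             })
--         if i + 1 < len(conversation):
--             conversations.append({
--                 "from": "gpt",
--                 "value": conversation[i + 1]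
--             })
--     return conversations
-- ===== SOURCE B (Python) =====
-- def convert_ultrachat_to_standard_format(conversation):
--     """Convert UltraChat format to standard conversation format."""
--     return [
--         {"from": "human" if i % 2 == 0 else "gpt", "value": msg}
--         for i, msg in enumerate(conversation)
--     ]
-- ===== Notes on version B (the rewrite author's own statement) =====
-- stated objective: idiomatic
-- what changed: Replaces the step-2 index loop with two guarded appends by a single enumerate-based comprehension that picks the role from the index's parity.
import Mathlib
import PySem

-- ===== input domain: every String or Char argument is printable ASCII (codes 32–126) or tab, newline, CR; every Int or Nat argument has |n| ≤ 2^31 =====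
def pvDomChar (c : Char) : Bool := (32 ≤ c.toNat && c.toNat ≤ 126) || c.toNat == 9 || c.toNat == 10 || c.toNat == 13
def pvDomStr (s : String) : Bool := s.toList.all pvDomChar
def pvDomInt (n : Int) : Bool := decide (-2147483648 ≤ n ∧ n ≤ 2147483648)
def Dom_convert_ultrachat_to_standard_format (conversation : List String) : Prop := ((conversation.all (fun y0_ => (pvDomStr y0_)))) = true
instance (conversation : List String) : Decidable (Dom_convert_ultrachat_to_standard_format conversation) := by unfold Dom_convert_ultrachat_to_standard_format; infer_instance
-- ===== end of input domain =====

-- B replaces A's step-2 index loop (two guarded appends per iteration) by a single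
-- enumerate pass choosing the role from the index's parity; objective: idiomatic.


-- ===== PORT A =====
-- one iteration of A's loop body (two guarded appends)
def pvStepA (c : List String) (acc : List (List (String × String))) (i : Int) :
    List (List (String × String)) :=
  let acc1 := if i < (c.length : Int) then
      acc ++ [[("from", "human"), ("value", PySem.List.pyGetD c i "")]] else acc
  if i + 1 < (c.length : Int) then
      acc1 ++ [[("from", "gpt"), ("value", PySem.List.pyGetD c (i + 1) "")]] else acc1

def convert_ultrachat_to_standard_format (conversation : List String) :
    List (List (String × String)) :=
  (PySem.List.pyRange 0 (conversation.length : Int) 2).foldl (pvStepA conversation) []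

-- ===== PORT B =====
def convert_ultrachat_to_standard_format_alt (conversation : List String) :
    List (List (String × String)) :=
  (PySem.List.enumerate conversation).map (fun p =>
    [("from", if PySem.Int.mod p.1 2 = 0 then "human" else "gpt"), ("value", p.2)])

-- ===== PRECONDITION & SPEC =====
def Spec_convert_ultrachat_to_standard_format (conversation : List String) (out : List (List (String × String))) : Prop := out = convert_ultrachat_to_standard_format_alt conversation
instance (conversation : List String) (out : List (List (String × String))) : Decidable (Spec_convert_ultrachat_to_standard_format conversation out) := by unfold Spec_convert_ultrachat_to_standard_format; infer_instance

-- ===== CLAIM (what is proved, stated in full; the proofs are below) =====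
def Claim_equal_convert_ultrachat_to_standard_format : Prop := ∀ (conversation : List String), Dom_convert_ultrachat_to_standard_format conversation → Spec_convert_ultrachat_to_standard_format conversation (convert_ultrachat_to_standard_format conversation)

-- ===== LEMMAS AND PROOFS =====

-- the common closed form: alternate human/gpt down the list, two elements at a time
def pvPairs : List String → List (List (String × String))
  | [] => []
  | [a] => [[("from", "human"), ("value", a)]]
  | a :: b :: t =>
      [("from", "human"), ("value", a)] :: [("from", "gpt"), ("value", b)] :: pvPairs t

-- peel the first element of a step-2 range
lemma pvRange_two_cons (a b : Int) (h : a < b) :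
    PySem.List.pyRange a b 2 = a :: PySem.List.pyRange (a + 2) b 2 := by
  rw [PySem.List.pyRange_of_pos a b (by norm_num),
      PySem.List.pyRange_of_pos (a + 2) b (by norm_num)]
  by_cases h2 : a + 2 < b
  · simp only [if_pos h, if_pos h2]
    have : ((b - a + 2 - 1) / 2).toNat = ((b - (a + 2) + 2 - 1) / 2).toNat + 1 := by omega
    rw [this, List.range_succ_eq_map, List.map_cons, List.map_map]
    simp only [Nat.cast_zero, mul_zero, add_zero]
    congr 1
    apply List.map_congr_left
    intro x _
    simp only [Function.comp_apply]
    push_cast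
    ring
  · simp only [if_pos h, if_neg h2]
    have : ((b - a + 2 - 1) / 2).toNat = 1 := by omega
    simp [this, List.range_succ]

lemma pvA_fold (t : List String) : ∀ (pre : List String) (acc : List (List (String × String))),
    (PySem.List.pyRange (pre.length : Int) ((pre.length + t.length : Nat) : Int) 2).foldl
      (pvStepA (pre ++ t)) acc = acc ++ pvPairs t := by
  induction t using pvPairs.induct with
  | case1 =>
      intro pre acc
      simp [PySem.List.pyRange_of_pos _ _ (show (0:Int) < 2 by norm_num), pvPairs]
  | case2 a =>
      intro pre acc
      rw [pvRange_two_cons _ _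
        (by simp only [List.length_cons, List.length_nil]; push_cast; omega)]
      have hnil : PySem.List.pyRange ((pre.length : Int) + 2)
          ((pre.length + [a].length : Nat) : Int) 2 = [] := by
        rw [PySem.List.pyRange_of_pos _ _ (show (0:Int) < 2 by norm_num),
            if_neg (by simp only [List.length_cons, List.length_nil]; push_cast; omega)]
        simp
      rw [hnil, List.foldl_cons, List.foldl_nil]
      unfold pvStepA
      have h1 : (pre.length : Int) < (((pre ++ [a]).length : Nat) : Int) := by
        simp only [List.length_append, List.length_cons, List.length_nil]; push_cast; omega
      have h2 : ¬ ((pre.length : Int) + 1 < (((pre ++ [a]).length : Nat) : Int)) := by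
        simp only [List.length_append, List.length_cons, List.length_nil]; push_cast; omega
      rw [if_pos h1, if_neg h2]
      rw [PySem.List.pyGetD_natCast]
      simp [List.getD_eq_getElem?_getD, pvPairs]
  | case3 a b t ih =>
      intro pre acc
      rw [pvRange_two_cons _ _
        (by simp only [List.length_cons]; push_cast; omega)]
      rw [List.foldl_cons]
      have key : pvStepA (pre ++ a :: b :: t) acc (pre.length : Int)
          = acc ++ [[("from", "human"), ("value", a)], [("from", "gpt"), ("value", b)]] := by
        unfold pvStepA
        have h1 : (pre.length : Int) < (((pre ++ a :: b :: t).length : Nat) : Int) := by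
          simp only [List.length_append, List.length_cons]; push_cast; omega
        have h2 : (pre.length : Int) + 1 < (((pre ++ a :: b :: t).length : Nat) : Int) := by
          simp only [List.length_append, List.length_cons]; push_cast; omega
        rw [if_pos h1, if_pos h2]
        rw [show ((pre.length : Int) + 1) = (((pre.length + 1 : Nat)) : Int) by push_cast; ring,
            PySem.List.pyGetD_natCast, PySem.List.pyGetD_natCast]
        simp [List.getD_eq_getElem?_getD, List.append_assoc]
      rw [key]
      have hpre : pre ++ a :: b :: t = (pre ++ [a, b]) ++ t := by simp
      have hlen : ((pre.length : Int) + 2) = (((pre ++ [a, b]).length : Nat) : Int) := by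
        simp only [List.length_append, List.length_cons, List.length_nil]; push_cast; omega
      have hlen2 : ((pre.length + (a :: b :: t).length : Nat) : Int)
          = (((pre ++ [a, b]).length + t.length : Nat) : Int) := by
        simp only [List.length_append, List.length_cons, List.length_nil]; push_cast; omega
      rw [hpre, hlen, hlen2, ih (pre ++ [a, b])]
      simp [pvPairs]

lemma pvB_map (t : List String) : ∀ (j : Nat),
    (PySem.List.enumerate t (2 * (j : Int))).map (fun p =>
      [("from", if PySem.Int.mod p.1 2 = 0 then "human" else "gpt"), ("value", p.2)])
      = pvPairs t := by
  induction t using pvPairs.induct with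
  | case1 => intro j; simp [PySem.List.enumerate, pvPairs]
  | case2 a =>
      intro j
      simp only [PySem.List.enumerate_cons, PySem.List.enumerate_nil, List.map_cons,
        List.map_nil, pvPairs]
      simp
  | case3 a b t ih =>
      intro j
      simp only [PySem.List.enumerate_cons, List.map_cons, pvPairs]
      have h2 : (2 * (j : Int) + 1 + 1) = 2 * ((j + 1 : Nat) : Int) := by push_cast; ring
      rw [h2, ih (j + 1)]
      simp

-- ===== VERDICT (by name: the statement is the Claim_ definition above) =====
theorem convert_ultrachat_to_standard_format_spec : Claim_equal_convert_ultrachat_to_standard_format := by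
  intro c _
  show _ = _
  unfold convert_ultrachat_to_standard_format convert_ultrachat_to_standard_format_alt
  have hA := pvA_fold c [] []
  simp only [List.nil_append, List.length_nil, Nat.cast_zero, Nat.zero_add, List.nil_append] at hA
  have hB := pvB_map c 0
  simp only [Nat.cast_zero, mul_zero] at hB
  rw [hA]
  exact hB.symm
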